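-- pv_equiv track=rewrite | github.com/jackmappotion/programmers_algorithm | 해시/의상.py | get_arg_dict
-- ===== SOURCE A (Python) =====
-- def get_arg_dict(clothes):
--     arg_dict = dict()
--     for arg, arg_type in clothes:
--         if arg_type in arg_dict:
--             arg_dict[arg_type] += 1
--         else:
--             arg_dict[arg_type] = 2
--     return arg_dict
-- ===== SOURCE B (Python) =====
-- def get_arg_dict(clothes):
--     # Collect the distinct types in first-occurrence order, then count each
--     # distinct type with a full scan of the type list (count-per-key instead
--     # of a single incremental counting pass).
--     types = [arg_type for arg, arg_type in clothes]
--     seen = []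
--     for t in types:
--         if t not in seen:
--             seen.append(t)
--     return {t: types.count(t) + 1 for t in seen}
-- ===== Notes on version B (the rewrite author's own statement) =====
-- stated objective: alternative
-- what changed: Replaces A's single incremental counting loop over a dict with a dedup-then-count scheme: first build the list of distinct types in first-occurrence order, then compute each type's value by a full list.count scan plus one.
import Mathlib
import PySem

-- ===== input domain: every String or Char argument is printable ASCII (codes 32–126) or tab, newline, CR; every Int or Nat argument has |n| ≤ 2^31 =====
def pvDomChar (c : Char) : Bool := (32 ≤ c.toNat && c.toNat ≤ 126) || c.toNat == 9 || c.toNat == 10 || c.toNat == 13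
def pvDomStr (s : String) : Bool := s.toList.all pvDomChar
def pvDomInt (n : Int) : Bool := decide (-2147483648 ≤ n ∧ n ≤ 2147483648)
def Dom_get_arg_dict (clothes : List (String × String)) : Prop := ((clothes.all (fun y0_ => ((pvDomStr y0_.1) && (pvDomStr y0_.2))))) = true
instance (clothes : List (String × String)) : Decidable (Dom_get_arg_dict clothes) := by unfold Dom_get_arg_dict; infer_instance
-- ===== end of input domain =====

-- B collects the distinct types in first-occurrence order and then counts each type
-- with a full list scan, instead of A's single incremental dict-counting loop
-- (objective: alternative; not faster).


-- ===== PORT A =====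
-- the body of A's loop: `if arg_type in arg_dict: arg_dict[arg_type] += 1 else: arg_dict[arg_type] = 2`
def pvStepA (d : PySem.Dict String Int) (t : String) : PySem.Dict String Int :=
  if d.contains t then d.modify t 0 (· + 1) else d.insert t 2

def get_arg_dict (clothes : List (String × String)) : List (String × Int) :=
  (clothes.foldl (fun d p => pvStepA d p.2) PySem.Dict.empty).items

-- ===== PORT B =====
def get_arg_dict_alt (clothes : List (String × String)) : List (String × Int) :=
  let types := clothes.map (fun p => p.2)
  let seen := types.foldl PySem.Set.add ([] : PySem.Set String)   -- 'if t not in seen: seen.append(t)'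
  seen.map (fun t => (t, (PySem.List.count types t : Int) + 1))

-- ===== PRECONDITION & SPEC =====
def Spec_get_arg_dict (clothes : List (String × String)) (out : List (String × Int)) : Prop := out = get_arg_dict_alt clothes
instance (clothes : List (String × String)) (out : List (String × Int)) : Decidable (Spec_get_arg_dict clothes out) := by unfold Spec_get_arg_dict; infer_instance

-- ===== CLAIM (what is proved, stated in full; the proofs are below) =====
def Claim_equal_get_arg_dict : Prop := ∀ (clothes : List (String × String)), Dom_get_arg_dict clothes → Spec_get_arg_dict clothes (get_arg_dict clothes)

-- ===== LEMMAS AND PROOFS =====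

-- A's dict after folding a list of types holds exactly the distinct types in
-- first-occurrence order, each mapped to its count plus one.
theorem pvA_items (ts : List String) :
    (ts.foldl pvStepA PySem.Dict.empty).items
    = (PySem.Set.ofList ts).map (fun k => (k, (ts.count k : Int) + 1)) := by
  induction ts using List.reverseRecOn with
  | nil => rfl
  | append_singleton ts x ih =>
    rw [List.foldl_append, List.foldl_cons, List.foldl_nil,
        PySem.Set.ofList_append_singleton]
    have hkeys : (ts.foldl pvStepA PySem.Dict.empty).keys = PySem.Set.ofList ts := by
      show (ts.foldl pvStepA PySem.Dict.empty).items.map Prod.fst = _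
      rw [ih, List.map_map]
      exact List.map_id (PySem.Set.ofList ts)
    have hnodup : (ts.foldl pvStepA PySem.Dict.empty).keys.Nodup := by
      rw [hkeys]; exact PySem.Set.nodup_ofList ts
    by_cases hx : x ∈ ts
    · have hmemo : x ∈ PySem.Set.ofList ts := (PySem.Set.mem_ofList ts x).mpr hx
      have hc : (ts.foldl pvStepA PySem.Dict.empty).contains x = true :=
        (PySem.Dict.contains_iff_mem_keys _ x).mpr (hkeys ▸ hmemo)
      have hgd : (ts.foldl pvStepA PySem.Dict.empty).getD x 0 = (ts.count x : Int) + 1 :=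
        PySem.Dict.getD_of_mem_items _
          (by rw [ih]; exact List.mem_map.mpr ⟨x, hmemo, rfl⟩) hnodup 0
      rw [pvStepA, if_pos hc, PySem.Set.add_of_mem hmemo]
      show ((ts.foldl pvStepA PySem.Dict.empty).insert x
        ((ts.foldl pvStepA PySem.Dict.empty).getD x 0 + 1)).items = _
      rw [PySem.Dict.items_insert_of_contains _ _ hc, ih, List.map_map]
      apply List.map_congr_left
      intro k hk
      by_cases hkx : k = x
      · subst hkx
        simp [hgd, List.count_append]
      · have hne : ((k, (ts.count k : Int) + 1).1 == x) = false := by simpa using hkx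
        simp only [Function.comp_apply, hne, Bool.false_eq_true, if_false]
        have : (ts ++ [x]).count k = ts.count k := by
          simp [List.count_append, Ne.symm hkx]
        rw [this]
    · have hmemo : x ∉ PySem.Set.ofList ts := fun h => hx ((PySem.Set.mem_ofList ts x).mp h)
      have hc : (ts.foldl pvStepA PySem.Dict.empty).contains x = false := by
        rcases h : (ts.foldl pvStepA PySem.Dict.empty).contains x with _ | _
        · rfl
        · exact absurd (hkeys ▸ (PySem.Dict.contains_iff_mem_keys _ x).mp h) hmemo
      rw [pvStepA, if_neg (by simp [hc]), PySem.Set.add_of_not_mem hmemo,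
          PySem.Dict.items_insert_of_not_contains _ _ hc, ih, List.map_append]
      congr 1
      · apply List.map_congr_left
        intro k hk
        have hkx : k ≠ x := fun h => hmemo (h ▸ hk)
        have : (ts ++ [x]).count k = ts.count k := by
          simp [List.count_append, Ne.symm hkx]
        rw [this]
      · simp [List.count_append, List.count_eq_zero.mpr hx]

-- ===== VERDICT (by name: the statement is the Claim_ definition above) =====
theorem get_arg_dict_spec : Claim_equal_get_arg_dict := by
  intro clothes _
  show get_arg_dict clothes = get_arg_dict_alt clothes
  unfold get_arg_dict get_arg_dict_alt
  have h1 : clothes.foldl (fun d p => pvStepA d p.2) PySem.Dict.empty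
      = (clothes.map (fun p => p.2)).foldl pvStepA PySem.Dict.empty := by
    rw [List.foldl_map]
  rw [h1, pvA_items]
  rfl
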